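-- pv_equiv track=rewrite | github.com/junzis/pyVDL2 | pyVDL2/common.py | dumpdemod
-- ===== SOURCE A (Python) =====
-- def dumpdemod(data):
--     if isinstance(data[0], int):
--         intstr = "".join(map(str, data))
--     elif isinstance(data[0], str):
--         intstr = data
--
--     res = ""
--     for i, s in enumerate(intstr):
--         if i > 0 and i % 5 == 0:
--             res += " "
--
--         if i > 0 and i % 50 == 0:
--             res += "\n"
--
--         res = res + s
--
--     return res
-- ===== SOURCE B (Python) =====
-- def dumpdemod(data):
--     if isinstance(data[0], int):
--         intstr = "".join(map(str, data))
--     elif isinstance(data[0], str):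
--         intstr = data
--
--     lines = []
--     for i in range(0, len(intstr), 50):
--         line = intstr[i:i + 50]
--         groups = ["".join(line[j:j + 5]) for j in range(0, len(line), 5)]
--         lines.append(" ".join(groups))
--     return " \n".join(lines)
-- ===== Notes on version B (the rewrite author's own statement) =====
-- stated objective: alternative
-- what changed: Replaces the per-character modulo-tested accumulation with nested chunk slicing: the concatenated digit string is cut into 50-character lines and each line into 5-character groups, joined with ' ' inside a line and ' \n' between lines.
import Mathlib
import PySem

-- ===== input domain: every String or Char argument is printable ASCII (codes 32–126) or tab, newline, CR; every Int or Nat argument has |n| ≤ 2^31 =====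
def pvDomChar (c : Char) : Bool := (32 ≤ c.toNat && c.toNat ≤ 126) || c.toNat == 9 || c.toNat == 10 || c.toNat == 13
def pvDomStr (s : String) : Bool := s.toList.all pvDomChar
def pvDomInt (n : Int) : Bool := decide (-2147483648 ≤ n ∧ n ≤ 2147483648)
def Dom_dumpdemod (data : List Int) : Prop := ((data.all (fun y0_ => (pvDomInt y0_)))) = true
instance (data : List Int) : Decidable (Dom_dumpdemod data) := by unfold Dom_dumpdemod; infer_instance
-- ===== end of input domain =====

-- B groups the concatenated digit string by nested chunk slicing (50-char lines, 5-char groups, joined)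
-- instead of A's per-character modulo-tested accumulation; same return value, objective: alternative.

-- ===== PORT A =====
-- strings are handled on the List Char side (PySem convention); res += s is res ++ [c]
def dumpdemod (data : List Int) : String :=
  -- data : List Int, so isinstance(data[0], int) holds; data[0] raises IndexError on [] (excluded by Pre_)
  let intstr : List Char := PySem.Chars.join [] (data.map PySem.Int.toChars)
  let res : List Char :=
    (PySem.List.enumerate intstr).foldl (fun res p =>
      let res := if p.1 > 0 ∧ PySem.Int.mod p.1 5 = 0 then res ++ [' '] else res
      let res := if p.1 > 0 ∧ PySem.Int.mod p.1 50 = 0 then res ++ ['\n'] else res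
      res ++ [p.2]) []
  String.mk res

-- ===== PORT B =====
def dumpdemod_alt (data : List Int) : String :=
  let intstr : List Char := PySem.Chars.join [] (data.map PySem.Int.toChars)
  let lines : List (List Char) :=
    (PySem.List.pyRange 0 (PySem.List.len intstr) 50).map (fun i =>
      let line := PySem.List.slice intstr (some i) (some (i + 50))
      let groups := (PySem.List.pyRange 0 (PySem.List.len line) 5).map (fun j =>
        PySem.List.slice line (some j) (some (j + 5)))
      PySem.Chars.join [' '] groups)
  String.mk (PySem.Chars.join [' ', '\n'] lines)

-- ===== PRECONDITION & SPEC =====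
-- Pre_ excludes only the empty list, on which Python A raises IndexError at data[0].
def Pre_dumpdemod (data : List Int) : Prop := data ≠ []
instance (data : List Int) : Decidable (Pre_dumpdemod data) := by unfold Pre_dumpdemod; infer_instance
def pvWitness_dumpdemod : List Int := [1, 2, 3]

def Spec_dumpdemod (data : List Int) (out : String) : Prop := out = dumpdemod_alt data
instance (data : List Int) (out : String) : Decidable (Spec_dumpdemod data out) := by unfold Spec_dumpdemod; infer_instance

-- ===== CLAIM (what is proved, stated in full; the proofs are below) =====
def Claim_equal_dumpdemod : Prop := ∀ (data : List Int), Dom_dumpdemod data → Pre_dumpdemod data → Spec_dumpdemod data (dumpdemod data)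

-- ===== LEMMAS AND PROOFS =====

-- reference form: the output characters with the separator decided by the absolute index
def pvH : List Char → Nat → List Char
  | [], _ => []
  | c :: r, i => (if 0 < i ∧ i % 5 = 0 then [' '] else []) ++ c :: pvH r (i + 1)

def pvG : List Char → Nat → List Char
  | [], _ => []
  | c :: r, i =>
      (if 0 < i ∧ i % 50 = 0 then [' ', '\n']
       else if 0 < i ∧ i % 5 = 0 then [' '] else []) ++ c :: pvG r (i + 1)

theorem pvH_small (xs : List Char) : ∀ i, i + xs.length ≤ 5 → pvH xs i = xs := by
  induction xs with
  | nil => intro i _; rfl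
  | cons c r ih =>
    intro i h
    simp only [List.length_cons] at h
    have : ¬ (0 < i ∧ i % 5 = 0) := by omega
    simp [pvH, this, ih (i + 1) (by omega)]

theorem pvG_small (xs : List Char) : ∀ i, i + xs.length ≤ 50 → pvG xs i = pvH xs i := by
  induction xs with
  | nil => intro i _; rfl
  | cons c r ih =>
    intro i h
    simp only [List.length_cons] at h
    have : ¬ (0 < i ∧ i % 50 = 0) := by omega
    simp [pvG, pvH, this, ih (i + 1) (by omega)]

theorem pvH_split (xs : List Char) : ∀ (ys : List Char) (i : Nat),
    pvH (xs ++ ys) i = pvH xs i ++ pvH ys (i + xs.length) := by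
  induction xs with
  | nil => intro ys i; simp [pvH]
  | cons c r ih =>
    intro ys i
    simp only [List.cons_append, pvH, ih ys (i + 1), List.length_cons]
    have : i + 1 + r.length = i + (r.length + 1) := by omega
    simp [this]

theorem pvG_split (xs : List Char) : ∀ (ys : List Char) (i : Nat),
    pvG (xs ++ ys) i = pvG xs i ++ pvG ys (i + xs.length) := by
  induction xs with
  | nil => intro ys i; simp [pvG]
  | cons c r ih =>
    intro ys i
    simp only [List.cons_append, pvG, ih ys (i + 1), List.length_cons]
    have : i + 1 + r.length = i + (r.length + 1) := by omega
    simp [this]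

theorem pvH_shift (xs : List Char) : ∀ i, 0 < i → pvH xs (i + 5) = pvH xs i := by
  induction xs with
  | nil => intro i _; rfl
  | cons c r ih =>
    intro i hi
    have h5 : (i + 5) % 5 = i % 5 := by omega
    have := ih (i + 1) (by omega)
    simp only [pvH, h5]
    have hpos : (0 < i + 5 ∧ i % 5 = 0) ↔ (0 < i ∧ i % 5 = 0) := by omega
    rw [if_congr hpos rfl rfl]
    have harr : i + 5 + 1 = i + 1 + 5 := by omega
    rw [harr, this]

theorem pvG_shift (xs : List Char) : ∀ i, 0 < i → pvG xs (i + 50) = pvG xs i := by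
  induction xs with
  | nil => intro i _; rfl
  | cons c r ih =>
    intro i hi
    have h50 : (i + 50) % 50 = i % 50 := by omega
    have h5 : (i + 50) % 5 = i % 5 := by omega
    have := ih (i + 1) (by omega)
    simp only [pvG, h50, h5]
    have hp1 : (0 < i + 50 ∧ i % 50 = 0) ↔ (0 < i ∧ i % 50 = 0) := by omega
    have hp2 : (0 < i + 50 ∧ i % 5 = 0) ↔ (0 < i ∧ i % 5 = 0) := by omega
    rw [if_congr hp1 rfl (if_congr hp2 rfl rfl)]
    have harr : i + 50 + 1 = i + 1 + 50 := by omega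
    rw [harr, this]

theorem pvH_five (xs : List Char) (h : xs ≠ []) : pvH xs 5 = ' ' :: pvH xs 0 := by
  cases xs with
  | nil => exact absurd rfl h
  | cons c r =>
    simp only [pvH]
    have : (5 : Nat) + 1 = 1 + 5 := by omega
    rw [this, pvH_shift r 1 (by omega)]
    norm_num

theorem pvG_fifty (xs : List Char) (h : xs ≠ []) : pvG xs 50 = ' ' :: '\n' :: pvG xs 0 := by
  cases xs with
  | nil => exact absurd rfl h
  | cons c r =>
    simp only [pvG]
    have : (50 : Nat) + 1 = 1 + 50 := by omega
    rw [this, pvG_shift r 1 (by omega)]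
    norm_num

theorem pvJoin_cons_ne (sep p : List Char) (rest : List (List Char)) (h : rest ≠ []) :
    PySem.Chars.join sep (p :: rest) = p ++ sep ++ PySem.Chars.join sep rest := by
  cases rest with
  | nil => exact absurd rfl h
  | cons q r => exact PySem.Chars.join_cons_cons sep p q r

-- joining the 5-chunks of a line with ' ' produces pvH
theorem pvJoin5 : ∀ (n : Nat) (line : List Char), line.length ≤ n →
    PySem.Chars.join [' ']
      ((List.range ((line.length + 4) / 5)).map (fun k => (line.drop (5 * k)).take 5))
      = pvH line 0 := by
  intro n
  induction n with
  | zero =>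
    intro line h
    have : line = [] := List.eq_nil_of_length_eq_zero (by omega)
    subst this
    simp [pvH, PySem.Chars.join_nil]
  | succ n ih =>
    intro line h
    by_cases hnil : line = []
    · subst hnil; simp [pvH, PySem.Chars.join_nil]
    · have hlen : 0 < line.length := List.length_pos_iff.mpr hnil
      have hm : (line.length + 4) / 5 = ((line.drop 5).length + 4) / 5 + 1 := by
        simp only [List.length_drop]; omega
      rw [hm, List.range_succ_eq_map, List.map_cons, List.map_map]
      have hfun : ((fun k => (line.drop (5 * k)).take 5) ∘ Nat.succ)
          = (fun k => ((line.drop 5).drop (5 * k)).take 5) := by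
        funext k
        simp only [Function.comp, List.drop_drop]
        congr 2
        omega
      rw [hfun]
      simp only [Nat.mul_zero, List.drop_zero]
      by_cases hd : line.drop 5 = []
      · have hle : line.length ≤ 5 := by
          have := List.drop_eq_nil_iff.mp hd; omega
        rw [hd]
        norm_num
        rw [List.take_of_length_le hle, pvH_small line 0 (by omega)]
      · have hdl : 0 < (line.drop 5).length := List.length_pos_iff.mpr hd
        have hne : (List.range (((line.drop 5).length + 4) / 5)).map
            (fun k => ((line.drop 5).drop (5 * k)).take 5) ≠ [] := by
          simp only [ne_eq, List.map_eq_nil_iff, List.range_eq_nil]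
          omega
        rw [pvJoin_cons_ne _ _ _ hne]
        rw [ih (line.drop 5) (by simp only [List.length_drop]; omega)]
        have hlen5 : 5 < line.length := by
          simp only [List.length_drop] at hdl; omega
        conv_rhs => rw [← List.take_append_drop 5 line]
        rw [pvH_split]
        rw [pvH_small (line.take 5) 0 (by simp only [List.length_take]; omega)]
        rw [List.length_take, min_eq_left (by omega), Nat.zero_add]
        rw [pvH_five (line.drop 5) hd]
        simp

-- joining the pvH-rendered 50-chunks with ' \n' produces pvG
theorem pvJoin50 : ∀ (n : Nat) (cs : List Char), cs.length ≤ n →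
    PySem.Chars.join [' ', '\n']
      ((List.range ((cs.length + 49) / 50)).map (fun k => pvH ((cs.drop (50 * k)).take 50) 0))
      = pvG cs 0 := by
  intro n
  induction n with
  | zero =>
    intro cs h
    have : cs = [] := List.eq_nil_of_length_eq_zero (by omega)
    subst this
    simp [pvG, PySem.Chars.join_nil]
  | succ n ih =>
    intro cs h
    by_cases hnil : cs = []
    · subst hnil; simp [pvG, PySem.Chars.join_nil]
    · have hlen : 0 < cs.length := List.length_pos_iff.mpr hnil
      have hm : (cs.length + 49) / 50 = ((cs.drop 50).length + 49) / 50 + 1 := by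
        simp only [List.length_drop]; omega
      rw [hm, List.range_succ_eq_map, List.map_cons, List.map_map]
      have hfun : ((fun k => pvH ((cs.drop (50 * k)).take 50) 0) ∘ Nat.succ)
          = (fun k => pvH (((cs.drop 50).drop (50 * k)).take 50) 0) := by
        funext k
        simp only [Function.comp, List.drop_drop]
        congr 3
        omega
      rw [hfun]
      simp only [Nat.mul_zero, List.drop_zero]
      by_cases hd : cs.drop 50 = []
      · have hle : cs.length ≤ 50 := by
          have := List.drop_eq_nil_iff.mp hd; omega
        rw [hd]
        norm_num
        rw [List.take_of_length_le hle, pvG_small cs 0 (by omega)]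
      · have hdl : 0 < (cs.drop 50).length := List.length_pos_iff.mpr hd
        have hne : (List.range (((cs.drop 50).length + 49) / 50)).map
            (fun k => pvH (((cs.drop 50).drop (50 * k)).take 50) 0) ≠ [] := by
          simp only [ne_eq, List.map_eq_nil_iff, List.range_eq_nil]
          omega
        rw [pvJoin_cons_ne _ _ _ hne]
        rw [ih (cs.drop 50) (by simp only [List.length_drop]; omega)]
        have hlen50 : 50 < cs.length := by
          simp only [List.length_drop] at hdl; omega
        conv_rhs => rw [← List.take_append_drop 50 cs]
        rw [pvG_split]
        rw [pvG_small (cs.take 50) 0 (by simp only [List.length_take]; omega)]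
        rw [List.length_take, min_eq_left (by omega), Nat.zero_add]
        rw [pvG_fifty (cs.drop 50) hd]
        simp

-- B's inner loop (groups of 5 within one line)
theorem pvChunkLem (line : List Char) :
    PySem.Chars.join [' '] ((PySem.List.pyRange 0 (PySem.List.len line) 5).map
      (fun j => PySem.List.slice line (some j) (some (j + 5)))) = pvH line 0 := by
  rw [PySem.List.len_eq, PySem.List.pyRange_of_pos _ _ (show (0:Int) < 5 by norm_num), List.map_map]
  have hM : (if (0:Int) < (line.length : Int)
      then (((line.length : Int) - 0 + 5 - 1) / 5).toNat else 0) = (line.length + 4) / 5 := by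
    split <;> omega
  rw [hM]
  have hfun : ((fun j => PySem.List.slice line (some j) (some (j + 5))) ∘ (fun k : Nat => (0:Int) + 5 * ↑k))
      = (fun k => (line.drop (5 * k)).take 5) := by
    funext k
    simp only [Function.comp]
    have h1 : ((0:Int) + 5 * (k:Int)) = ((5 * k : Nat) : Int) := by push_cast; ring
    have h2 : ((5 * k : Nat) : Int) + 5 = ((5 * k : Nat) : Int) + ((5:Nat):Int) := by norm_num
    rw [h1, h2, PySem.List.slice_natCast_add]
  rw [hfun]
  exact pvJoin5 line.length line le_rfl

-- B's whole body equals pvG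
theorem pvBLem (cs : List Char) :
    PySem.Chars.join [' ', '\n'] ((PySem.List.pyRange 0 (PySem.List.len cs) 50).map (fun i =>
      PySem.Chars.join [' '] ((PySem.List.pyRange 0
            (PySem.List.len (PySem.List.slice cs (some i) (some (i + 50)))) 5).map
        (fun j => PySem.List.slice (PySem.List.slice cs (some i) (some (i + 50))) (some j) (some (j + 5))))))
      = pvG cs 0 := by
  rw [PySem.List.len_eq, PySem.List.pyRange_of_pos _ _ (show (0:Int) < 50 by norm_num), List.map_map]
  have hM : (if (0:Int) < (cs.length : Int)
      then (((cs.length : Int) - 0 + 50 - 1) / 50).toNat else 0) = (cs.length + 49) / 50 := by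
    split <;> omega
  rw [hM]
  have hfun : ((fun i => PySem.Chars.join [' '] ((PySem.List.pyRange 0
            (PySem.List.len (PySem.List.slice cs (some i) (some (i + 50)))) 5).map
        (fun j => PySem.List.slice (PySem.List.slice cs (some i) (some (i + 50))) (some j) (some (j + 5)))))
        ∘ (fun k : Nat => (0:Int) + 50 * ↑k))
      = (fun k => pvH ((cs.drop (50 * k)).take 50) 0) := by
    funext k
    simp only [Function.comp]
    have h1 : ((0:Int) + 50 * (k:Int)) = ((50 * k : Nat) : Int) := by push_cast; ring
    have h2 : ((50 * k : Nat) : Int) + 50 = ((50 * k : Nat) : Int) + ((50:Nat):Int) := by norm_num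
    rw [h1, h2, PySem.List.slice_natCast_add]
    exact pvChunkLem _
  rw [hfun]
  exact pvJoin50 cs.length cs le_rfl

-- A's enumerated fold produces pvG
theorem pvFoldA (cs : List Char) : ∀ (i : Nat) (acc : List Char),
    (PySem.List.enumerate cs (i : Int)).foldl (fun res p =>
      let res := if p.1 > 0 ∧ PySem.Int.mod p.1 5 = 0 then res ++ [' '] else res
      let res := if p.1 > 0 ∧ PySem.Int.mod p.1 50 = 0 then res ++ ['\n'] else res
      res ++ [p.2]) acc = acc ++ pvG cs i := by
  induction cs with
  | nil => intro i acc; simp [PySem.List.enumerate_nil, pvG]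
  | cons c r ih =>
    intro i acc
    rw [PySem.List.enumerate_cons, List.foldl_cons]
    have hcast : ((i:Int) + 1) = ((i + 1 : Nat) : Int) := by push_cast; ring
    rw [hcast, ih (i + 1)]
    have h5 : ((5:Int) ∣ (i:Int)) ↔ i % 5 = 0 := by omega
    have h50 : ((50:Int) ∣ (i:Int)) ↔ i % 50 = 0 := by omega
    simp only [pvG]
    by_cases hi : 0 < i
    · by_cases hm5 : i % 5 = 0
      · by_cases hm50 : i % 50 = 0
        · simp [PySem.Int.mod_eq_zero_iff_dvd, h5, h50, hi, hm5, hm50]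
        · simp [PySem.Int.mod_eq_zero_iff_dvd, h5, h50, hi, hm5, hm50]
      · have hm50 : ¬ i % 50 = 0 := by omega
        simp [PySem.Int.mod_eq_zero_iff_dvd, h5, h50, hi, hm5, hm50]
    · have hgt : ¬ ((i:Int) > 0) := by omega
      simp [hgt, hi]

theorem pvMain (data : List Int) : dumpdemod data = dumpdemod_alt data := by
  simp only [dumpdemod, dumpdemod_alt]
  congr 1
  rw [pvBLem]
  have := pvFoldA (PySem.Chars.join [] (data.map PySem.Int.toChars)) 0 []
  simpa using this

-- ===== VERDICT (by name: the statement is the Claim_ definition above) =====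
theorem dumpdemod_spec : Claim_equal_dumpdemod := by
  intro data _ _
  exact pvMain data
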